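-- pv_equiv track=rewrite | github.com/alterfero/dig4el | libs/graphs_utils.py | list_paths_to_leaves
-- ===== SOURCE A (Python) =====
-- def list_paths_to_leaves(graph, start_node, end_node='sentence'):
--     #using DFS "Depth-First Search" to list all the paths from the start_node to leaves
--     #a leaf is a node that has no children or that is connected to the "sentence" node.
--     def dfs(current_node, path):
--         if current_node not in graph or not graph[current_node].get("requires"):
--             paths.append(path)
--             return
--
--         for child in graph[current_node]["requires"]:
--             dfs(child, path + [child])
--
--     paths = []
--     dfs(start_node, [start_node])
--     return paths
-- ===== SOURCE B (Python) =====
-- def list_paths_to_leaves(graph, start_node, end_node='sentence'):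
--     # B: iterative DFS with an explicit stack of (node, path) frames instead of
--     # recursion; children are pushed reversed so pop order matches A's
--     # left-to-right pre-order enumeration.
--     paths = []
--     stack = [(start_node, [start_node])]
--     while stack:
--         node, path = stack.pop()
--         if node not in graph or not graph[node].get("requires"):
--             paths.append(path)
--         else:
--             for child in reversed(graph[node]["requires"]):
--                 stack.append((child, path + [child]))
--     return paths
-- ===== Notes on version B (the rewrite author's own statement) =====
-- stated objective: alternative
-- what changed: A is a recursive nested dfs closure that mutates a shared results list while threading a growing path; B is an iterative DFS driven by an explicit stack of (node, path) frames, pushing children reversed so the pop order reproduces A's left-to-right pre-order exactly.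
import Mathlib
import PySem

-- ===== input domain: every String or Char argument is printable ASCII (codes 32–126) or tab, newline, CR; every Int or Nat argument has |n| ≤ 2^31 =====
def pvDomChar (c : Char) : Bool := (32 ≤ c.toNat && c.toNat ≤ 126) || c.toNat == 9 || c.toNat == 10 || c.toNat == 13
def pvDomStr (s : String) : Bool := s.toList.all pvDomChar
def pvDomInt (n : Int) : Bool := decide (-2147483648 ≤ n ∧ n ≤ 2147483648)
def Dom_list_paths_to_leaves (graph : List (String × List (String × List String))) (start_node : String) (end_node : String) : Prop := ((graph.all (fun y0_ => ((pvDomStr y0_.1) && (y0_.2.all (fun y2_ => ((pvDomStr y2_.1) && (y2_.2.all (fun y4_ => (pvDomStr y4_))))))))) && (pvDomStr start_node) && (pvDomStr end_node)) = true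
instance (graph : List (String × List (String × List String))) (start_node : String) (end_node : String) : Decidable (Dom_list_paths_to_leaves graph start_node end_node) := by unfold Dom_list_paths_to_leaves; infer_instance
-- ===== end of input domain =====

-- B replaces A's recursive DFS (a nested dfs closure appending to a shared results
-- list) by an iterative DFS over an explicit stack of (node, path) frames; objective:
-- alternative (same cost). Both ports carry fuel (graph.length + 1, a bound on the
-- path depth on acyclic inputs) purely as a totality guard; Pre_ excludes the cyclic
-- inputs on which the Python A raises RecursionError (and the Python B loops forever).

-- ===== PORT A =====
-- 'requires' list of a node, as both Pythons read it: graph[node].get("requires")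
-- (none if node is not in graph or the key is absent); the falsy test is 'none or []'.
def pvRequires (graph : List (String × List (String × List String))) (node : String) : Option (List String) :=
  match (PySem.Dict.mk graph).get? node with
  | none => none
  | some inner => (PySem.Dict.mk inner).get? "requires"

def pvDfsA (graph : List (String × List (String × List String))) :
    Nat → String → List String → List (List String) → List (List String)
  | 0, _, _, paths => paths
  | fuel + 1, current_node, path, paths =>
    match pvRequires graph current_node with
    | none => paths ++ [path]
    | some [] => paths ++ [path]
    | some reqs =>
      reqs.foldl (fun acc child => pvDfsA graph fuel child (path ++ [child]) acc) paths

def list_paths_to_leaves (graph : List (String × List (String × List String))) (start_node : String) (end_node : String) : List (List String) :=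
  pvDfsA graph (graph.length + 1) start_node [start_node] []

-- ===== PORT B =====
-- bound on the number of children any node can have, and the lemma the termination
-- measure of the stack loop cites (proof machinery only, not part of B's algorithm)
def pvW (graph : List (String × List (String × List String))) : Nat :=
  ((graph.flatMap (fun e => e.2.map (fun kv => kv.2.length))).foldl max 0)
theorem pvRequires_len_le (graph : List (String × List (String × List String)))
    (node : String) (reqs : List String) (h : pvRequires graph node = some reqs) :
    reqs.length ≤ pvW graph := by
  unfold pvRequires at h
  cases hg : (PySem.Dict.mk graph).get? node with
  | none => rw [hg] at h; exact absurd h (by simp)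
  | some inner =>
    rw [hg] at h
    have h1 := PySem.Dict.mem_items_of_get?_eq_some _ hg
    have h2 := PySem.Dict.mem_items_of_get?_eq_some _ h
    have hmem : reqs.length ∈ graph.flatMap (fun e => e.2.map (fun kv => kv.2.length)) := by
      simp only [List.mem_flatMap, List.mem_map]
      exact ⟨(node, inner), h1, ("requires", reqs), h2, rfl⟩
    exact (PySem.List.le_foldl_max _ _).2 _ hmem
-- the Python while-loop: list head = top of stack; Python pushes reversed(children)
-- one by one onto the stack end, which is prepending the children in order here
def pvLoopB (graph : List (String × List (String × List String))) :
    List (Nat × String × List String) → List (List String)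
  | [] => []
  | (0, _, _) :: stack => pvLoopB graph stack
  | (fuel + 1, node, path) :: stack =>
    match h : pvRequires graph node with
    | none => path :: pvLoopB graph stack
    | some [] => path :: pvLoopB graph stack
    | some (r :: rs) =>
      pvLoopB graph (((r :: rs).map (fun child => (fuel, child, path ++ [child]))) ++ stack)
termination_by stack => (stack.map (fun t => (pvW graph + 1) ^ t.1)).sum
decreasing_by
  · simp
  · simp
  · simp
  · have hb : (r :: rs).length ≤ pvW graph := pvRequires_len_le graph node (r :: rs) h
    have key : (pvW graph + 1) ^ fuel + rs.length * (pvW graph + 1) ^ fuel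
        < (pvW graph + 1) ^ (fuel + 1) := by
      have h1 : rs.length + 1 ≤ pvW graph := by simpa using hb
      have h2 : (pvW graph + 1) ^ fuel + rs.length * (pvW graph + 1) ^ fuel
          = (rs.length + 1) * (pvW graph + 1) ^ fuel := by ring
      rw [h2]
      calc (rs.length + 1) * (pvW graph + 1) ^ fuel
          ≤ pvW graph * (pvW graph + 1) ^ fuel := Nat.mul_le_mul_right _ h1
        _ < (pvW graph + 1) * (pvW graph + 1) ^ fuel :=
            (Nat.mul_lt_mul_right (Nat.pow_pos (Nat.succ_pos _))).mpr (Nat.lt_succ_self _)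
        _ = (pvW graph + 1) ^ (fuel + 1) := by ring
    simp only [List.map_append, List.map_map, Function.comp_def, List.map_cons,
      List.sum_append, List.sum_cons, List.map_const', List.sum_replicate, smul_eq_mul, Nat.succ_eq_add_one]
    omega

def list_paths_to_leaves_alt (graph : List (String × List (String × List String))) (start_node : String) (end_node : String) : List (List String) :=
  pvLoopB graph [(graph.length + 1, start_node, [start_node])]

-- ===== PRECONDITION & SPEC =====
-- children of a node in the edge relation both programs follow (empty for leaves)
def pvChildren (graph : List (String × List (String × List String))) (node : String) : List String :=
  (pvRequires graph node).getD []

-- nodes reachable (in ≥ 1 step) from n: one-step closure iterated graph.length times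
def pvReach (graph : List (String × List (String × List String))) (n : String) : List String :=
  (fun S => (S ++ S.flatMap (pvChildren graph)).dedup)^[graph.length] (pvChildren graph n)

-- Pre_ excludes exactly the inputs on which the Python A raises (RecursionError):
-- graphs with a cycle reachable from start_node (including through start_node itself).
def Pre_list_paths_to_leaves (graph : List (String × List (String × List String))) (start_node : String) (end_node : String) : Prop :=
  start_node ∉ pvReach graph start_node ∧
  ∀ k ∈ pvReach graph start_node, k ∉ pvReach graph k
instance (graph : List (String × List (String × List String))) (start_node : String) (end_node : String) : Decidable (Pre_list_paths_to_leaves graph start_node end_node) := by unfold Pre_list_paths_to_leaves; infer_instance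

def pvWitness_list_paths_to_leaves : (List (String × List (String × List String))) × String × String :=
  ([("a", [("requires", ["b", "c"])]), ("b", [("requires", ["d"])]), ("d", [])], "a", "sentence")

def Spec_list_paths_to_leaves (graph : List (String × List (String × List String))) (start_node : String) (end_node : String) (out : List (List String)) : Prop := out = list_paths_to_leaves_alt graph start_node end_node
instance (graph : List (String × List (String × List String))) (start_node : String) (end_node : String) (out : List (List String)) : Decidable (Spec_list_paths_to_leaves graph start_node end_node out) := by unfold Spec_list_paths_to_leaves; infer_instance

-- ===== CLAIM (what is proved, stated in full; the proofs are below) =====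
def Claim_equal_list_paths_to_leaves : Prop := ∀ (graph : List (String × List (String × List String))) (start_node : String) (end_node : String), Dom_list_paths_to_leaves graph start_node end_node → Pre_list_paths_to_leaves graph start_node end_node → Spec_list_paths_to_leaves graph start_node end_node (list_paths_to_leaves graph start_node end_node)

-- ===== LEMMAS AND PROOFS =====
-- proof-side characterisation shared by both directions: the suffix paths from a
-- node, fuel-indexed
def pvPaths (graph : List (String × List (String × List String))) :
    Nat → String → List (List String)
  | 0, _ => []
  | fuel + 1, node =>
    match pvRequires graph node with
    | none => [[node]]
    | some [] => [[node]]
    | some reqs => reqs.flatMap (fun child => (pvPaths graph fuel child).map (fun p => node :: p))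


theorem pvPaths_head (graph : List (String × List (String × List String))) :
    ∀ (fuel : Nat) (node : String) (p : List String), p ∈ pvPaths graph fuel node →
      ∃ t, p = node :: t := by
  intro fuel
  induction fuel with
  | zero => intro node p hp; simp [pvPaths] at hp
  | succ fuel ih =>
    intro node p hp
    simp only [pvPaths] at hp
    cases h : pvRequires graph node with
    | none => rw [h] at hp; simp at hp; exact ⟨[], by simp [hp]⟩
    | some reqs =>
      rw [h] at hp
      cases reqs with
      | nil => simp at hp; exact ⟨[], by simp [hp]⟩
      | cons r rs =>
        simp only [List.mem_flatMap, List.mem_map] at hp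
        obtain ⟨c, _, q, _, rfl⟩ := hp
        exact ⟨q, rfl⟩

theorem pvGlueList (graph : List (String × List (String × List String))) (fuel : Nat)
    (node : String) (path : List String) (l : List String) :
    (l.map (fun child => (fuel, child, path ++ [child]))).flatMap
        (fun t => (pvPaths graph t.1 t.2.1).map (fun s => t.2.2 ++ s.tail))
      = ((l.flatMap (fun child => (pvPaths graph fuel child).map (fun p => node :: p))).map
          (fun s => path ++ s.tail)) := by
  induction l with
  | nil => simp
  | cons c cs ih =>
    simp only [List.map_cons, List.flatMap_cons, List.map_append, ih, List.map_map,
      Function.comp_def, List.tail_cons]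
    congr 1
    apply List.map_congr_left
    intro s hs
    obtain ⟨t, rfl⟩ := pvPaths_head graph fuel c s hs
    simp

theorem pvLoopB_eq_pvPaths (graph : List (String × List (String × List String))) :
    ∀ (stack : List (Nat × String × List String)),
      pvLoopB graph stack
        = stack.flatMap (fun t => (pvPaths graph t.1 t.2.1).map (fun s => t.2.2 ++ s.tail)) := by
  intro stack
  fun_induction pvLoopB graph stack with
  | case1 => simp
  | case2 _ _ stack ih => simpa [pvPaths] using ih
  | case3 fuel node path stack h ih => simp [pvPaths, h, ih]
  | case4 fuel node path stack h ih => simp [pvPaths, h, ih]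
  | case5 fuel node path stack r rs h ih =>
    rw [ih, List.flatMap_append, pvGlueList graph fuel node path (r :: rs)]
    simp only [List.flatMap_cons, pvPaths, h]
-- A's dfs at (node, path' ++ [node]) appends to its accumulator exactly the suffix
-- paths of node, each prefixed by path'.
theorem pvDfsA_eq_pvPaths (graph : List (String × List (String × List String))) :
    ∀ (fuel : Nat) (node : String) (path' : List String) (acc : List (List String)),
      pvDfsA graph fuel node (path' ++ [node]) acc
        = acc ++ (pvPaths graph fuel node).map (fun p => path' ++ p) := by
  intro fuel
  induction fuel with
  | zero => intro node path' acc; simp [pvDfsA, pvPaths]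
  | succ fuel ih =>
    intro node path' acc
    simp only [pvDfsA, pvPaths]
    cases h : pvRequires graph node with
    | none => simp
    | some reqs =>
      cases reqs with
      | nil => simp
      | cons r rs =>
        have hstep : ∀ (child : String) (a : List (List String)),
            pvDfsA graph fuel child ((path' ++ [node]) ++ [child]) a
              = a ++ ((pvPaths graph fuel child).map (fun p => node :: p)).map
                      (fun p => path' ++ p) := by
          intro child a
          rw [ih child (path' ++ [node]) a]
          simp [List.map_map, Function.comp_def]
        calc (r :: rs).foldl (fun acc child => pvDfsA graph fuel child ((path' ++ [node]) ++ [child]) acc) acc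
            = (r :: rs).foldl (fun acc child =>
                acc ++ ((pvPaths graph fuel child).map (fun p => node :: p)).map
                        (fun p => path' ++ p)) acc := by
              apply PySem.List.foldl_congr_mem
              intro a c _
              exact hstep c a
          _ = acc ++ (r :: rs).flatMap (fun child =>
                ((pvPaths graph fuel child).map (fun p => node :: p)).map
                  (fun p => path' ++ p)) :=
              PySem.List.foldl_append_eq_flatMap _ _ _
          _ = acc ++ ((r :: rs).flatMap (fun child =>
                (pvPaths graph fuel child).map (fun p => node :: p))).map
                  (fun p => path' ++ p) := by
              simp [List.map_flatMap]


-- ===== VERDICT (by name: the statement is the Claim_ definition above) =====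
theorem list_paths_to_leaves_spec : Claim_equal_list_paths_to_leaves := by
  intro graph start_node end_node _ _
  unfold Spec_list_paths_to_leaves list_paths_to_leaves list_paths_to_leaves_alt
  rw [pvLoopB_eq_pvPaths]
  have hA := pvDfsA_eq_pvPaths graph (graph.length + 1) start_node [] []
  simp only [List.nil_append] at hA
  rw [hA]
  simp only [List.flatMap_cons, List.flatMap_nil, List.append_nil]
  apply List.map_congr_left
  intro p hp
  obtain ⟨t, rfl⟩ := pvPaths_head graph _ _ _ hp
  simp
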